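-- pv_equiv track=rewrite | github.com/thunlp/MetaAdaptRank | preprocess/utils/.ipynb_checkpoints/cv_spliter-checkpoint.py | get_covid_splited_qids
-- ===== SOURCE A (Python) =====
-- def get_covid_splited_qids(valid_qids, cv_num):
--     each_fold_num = int(len(valid_qids) / cv_num)
--     splited_qid_list = []
--     for k in range(cv_num):
--         splited_qids = []
--         for qid in range(k*each_fold_num+1, (k+1) * each_fold_num+1):
--             splited_qids.append(str(qid))
--         assert len(set(splited_qids)) == each_fold_num
--         splited_qid_list.append(splited_qids)
--     return splited_qid_list
-- ===== SOURCE B (Python) =====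
-- def get_covid_splited_qids(valid_qids, cv_num):
--     each_fold_num = int(len(valid_qids) / cv_num)
--     total = cv_num * each_fold_num
--     flat = [str(i) for i in range(1, total + 1)]
--     return [flat[k * each_fold_num:(k + 1) * each_fold_num] for k in range(cv_num)]
-- ===== Notes on version B (the rewrite author's own statement) =====
-- stated objective: simpler
-- what changed: B builds the whole 1..cv_num*each_fold_num list of strings once and returns it cut into folds by slicing, instead of A's nested loops that regenerate each fold number by number, and drops the always-true set-size assert.
-- outside the precondition, e.g. on get_covid_splited_qids(['a', 'b'], 0): A raises ZeroDivisionError, B raises ZeroDivisionError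
import Mathlib
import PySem

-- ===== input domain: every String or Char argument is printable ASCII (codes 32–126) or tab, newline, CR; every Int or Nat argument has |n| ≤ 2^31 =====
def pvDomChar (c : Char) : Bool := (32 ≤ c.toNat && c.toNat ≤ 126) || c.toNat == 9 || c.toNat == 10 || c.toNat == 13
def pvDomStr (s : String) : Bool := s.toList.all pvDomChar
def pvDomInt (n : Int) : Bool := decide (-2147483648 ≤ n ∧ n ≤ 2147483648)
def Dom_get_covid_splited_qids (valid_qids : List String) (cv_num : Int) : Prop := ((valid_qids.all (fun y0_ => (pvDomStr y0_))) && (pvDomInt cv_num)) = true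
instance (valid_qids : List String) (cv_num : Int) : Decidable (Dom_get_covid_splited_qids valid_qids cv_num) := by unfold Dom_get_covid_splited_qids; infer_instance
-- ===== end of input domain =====

-- B builds the flat list 1..cv_num*each_fold_num of strings once and slices it into folds,
-- instead of A's nested loops regenerating each fold number by number (objective: simpler);
-- same return value on every input where A returns (cv_num ≠ 0).

-- ===== PORT A =====
-- int(len(valid_qids) / cv_num): float division then int() truncates toward zero; on Dom's
-- bounded ints this is exactly PySem.Int.truncdiv (|len|,|cv_num| < 2^53).
-- The assert len(set(splited_qids)) == each_fold_num always holds (consecutive distinct ints),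
-- so it has no effect on the returned value.
def get_covid_splited_qids (valid_qids : List String) (cv_num : Int) : List (List String) :=
  let each_fold_num := PySem.Int.truncdiv (valid_qids.length : Int) cv_num
  (PySem.List.pyRange 0 cv_num 1).foldl (fun splited_qid_list k =>
    splited_qid_list ++
      [(PySem.List.pyRange (k * each_fold_num + 1) ((k + 1) * each_fold_num + 1) 1).foldl
        (fun splited_qids qid => splited_qids ++ [PySem.Int.toStr qid]) []]) []

-- ===== PORT B =====
def get_covid_splited_qids_alt (valid_qids : List String) (cv_num : Int) : List (List String) :=
  let each_fold_num := PySem.Int.truncdiv (valid_qids.length : Int) cv_num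
  let total := cv_num * each_fold_num
  let flat := (PySem.List.pyRange 1 (total + 1) 1).map PySem.Int.toStr
  (PySem.List.pyRange 0 cv_num 1).map (fun k =>
    PySem.List.slice flat (some (k * each_fold_num)) (some ((k + 1) * each_fold_num)))

-- ===== PRECONDITION & SPEC =====
-- Pre_ excludes only cv_num = 0, where Python's 'len(valid_qids) / cv_num' raises ZeroDivisionError.
def Pre_get_covid_splited_qids (valid_qids : List String) (cv_num : Int) : Prop := cv_num ≠ 0
instance (valid_qids : List String) (cv_num : Int) : Decidable (Pre_get_covid_splited_qids valid_qids cv_num) := by unfold Pre_get_covid_splited_qids; infer_instance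
def pvWitness_get_covid_splited_qids : List String × Int := (["a", "b", "c", "d"], 2)

def Spec_get_covid_splited_qids (valid_qids : List String) (cv_num : Int) (out : List (List String)) : Prop := out = get_covid_splited_qids_alt valid_qids cv_num
instance (valid_qids : List String) (cv_num : Int) (out : List (List String)) : Decidable (Spec_get_covid_splited_qids valid_qids cv_num out) := by unfold Spec_get_covid_splited_qids; infer_instance

-- ===== CLAIM (what is proved, stated in full; the proofs are below) =====
def Claim_equal_get_covid_splited_qids : Prop := ∀ (valid_qids : List String) (cv_num : Int), Dom_get_covid_splited_qids valid_qids cv_num → Pre_get_covid_splited_qids valid_qids cv_num → Spec_get_covid_splited_qids valid_qids cv_num (get_covid_splited_qids valid_qids cv_num)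

-- ===== LEMMAS AND PROOFS =====

-- Slicing the flat list [str(1), …, str(cv*e)] at [k*e, (k+1)*e) yields exactly fold k.
lemma slice_flat_eq (e cv k : Int) (he : 0 ≤ e) (hk0 : 0 ≤ k) (hk : k < cv) :
    PySem.List.slice ((PySem.List.pyRange 1 (cv * e + 1) 1).map PySem.Int.toStr)
      (some (k * e)) (some ((k + 1) * e))
    = (PySem.List.pyRange (k * e + 1) ((k + 1) * e + 1) 1).map PySem.Int.toStr := by
  have hke : 0 ≤ k * e := mul_nonneg hk0 he
  have hk1e : 0 ≤ (k + 1) * e := mul_nonneg (by omega) he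
  have h1 : (1 : Int) ≤ k * e + 1 := by omega
  have h2 : k * e + 1 ≤ (k + 1) * e + 1 := by
    have := mul_le_mul_of_nonneg_right (show k ≤ k + 1 by omega) he; omega
  have h3 : (k + 1) * e + 1 ≤ cv * e + 1 := by
    have := mul_le_mul_of_nonneg_right (show k + 1 ≤ cv by omega) he; omega
  rw [PySem.List.pyRange_one_append 1 (k * e + 1) (cv * e + 1) h1 (le_trans h2 h3),
      PySem.List.pyRange_one_append (k * e + 1) ((k + 1) * e + 1) (cv * e + 1) h2 h3,
      List.map_append, List.map_append,
      PySem.List.slice_toNat _ hke hk1e]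
  have hlen1 : ((PySem.List.pyRange 1 (k * e + 1) 1).map PySem.Int.toStr).length = (k * e).toNat := by
    simp [PySem.List.length_pyRange_one]
  have hlen2 : ((PySem.List.pyRange (k * e + 1) ((k + 1) * e + 1) 1).map PySem.Int.toStr).length
      = ((k + 1) * e).toNat - (k * e).toNat := by
    simp [PySem.List.length_pyRange_one]
    omega
  rw [← hlen1, List.drop_left, hlen1, ← hlen2, List.take_left]

-- A's value equals B's value for every nonzero cv_num.
lemma ports_agree (valid_qids : List String) (cv_num : Int) (hcv : cv_num ≠ 0) :
    get_covid_splited_qids valid_qids cv_num = get_covid_splited_qids_alt valid_qids cv_num := by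
  unfold get_covid_splited_qids get_covid_splited_qids_alt
  rcases lt_or_ge cv_num 0 with hneg | hpos
  · rw [PySem.List.pyRange_one_eq_nil (by omega)]
    simp
  · have hpos' : 0 < cv_num := lt_of_le_of_ne hpos (Ne.symm hcv)
    set e := PySem.Int.truncdiv (valid_qids.length : Int) cv_num with hE
    have he : 0 ≤ e := by
      rw [hE]
      simp [PySem.Int.truncdiv]
      exact Int.ediv_nonneg (by positivity) (le_of_lt hpos')
    rw [PySem.List.foldl_append_singleton_eq_map, List.nil_append]
    apply List.map_congr_left
    intro k hkmem
    rw [PySem.List.mem_pyRange_one] at hkmem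
    rw [PySem.List.foldl_append_singleton_eq_map, List.nil_append,
        slice_flat_eq e cv_num k he hkmem.1 hkmem.2]

-- ===== VERDICT (by name: the statement is the Claim_ definition above) =====
theorem get_covid_splited_qids_spec : Claim_equal_get_covid_splited_qids := by
  intro valid_qids cv_num _ hpre
  unfold Spec_get_covid_splited_qids
  exact ports_agree valid_qids cv_num hpre
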